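-- pv_equiv track=rewrite | github.com/infangle/xyz | F:\A2sv contests\Progress sheet/leetcode/minimum-moves-to-reach-target-score.py | minMoves
-- ===== SOURCE A (Python) =====
-- def minMoves(target: int, maxDoubles: int) -> int:
--     ans = 0
--     while target > 1:
--         ans += target % 2
--         target -= (target % 2)
--         if maxDoubles > 0:
--             target = (target // 2)
--             ans += 1
--             maxDoubles -= 1
--         else:
--             ans += (target - 1)
--             return ans
--
--     return ans
-- ===== SOURCE B (Python) =====
-- def minMoves(target: int, maxDoubles: int) -> int:
--     if target <= 1:
--         return 0
--     m = max(maxDoubles, 0)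
--     bl = target.bit_length() - 1
--     if m >= bl:
--         return bl + bin(target).count('1') - 1
--     return bin(target & ((1 << m) - 1)).count('1') + m + (target >> m) - 1
-- ===== Notes on version B (the rewrite author's own statement) =====
-- stated objective: alternative
-- what changed: Replaces A's downward halving loop with a closed-form bit_length/popcount formula (the doubles consume exactly the low maxDoubles bits).
import Mathlib
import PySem

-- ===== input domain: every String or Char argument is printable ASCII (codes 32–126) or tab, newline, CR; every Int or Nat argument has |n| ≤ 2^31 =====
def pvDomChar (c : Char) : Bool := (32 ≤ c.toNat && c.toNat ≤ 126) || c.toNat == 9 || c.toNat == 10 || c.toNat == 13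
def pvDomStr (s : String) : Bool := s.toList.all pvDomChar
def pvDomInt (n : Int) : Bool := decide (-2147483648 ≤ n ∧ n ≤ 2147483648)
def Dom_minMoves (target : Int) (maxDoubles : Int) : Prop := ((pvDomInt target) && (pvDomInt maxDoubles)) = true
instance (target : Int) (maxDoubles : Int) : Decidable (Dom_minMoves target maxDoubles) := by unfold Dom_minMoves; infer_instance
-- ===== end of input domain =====

-- B replaces A's halving loop by a closed-form bit_length/popcount formula (same value, proved equal).


-- ===== PORT A =====
def minMovesGo (target maxDoubles ans : Int) : Int :=
  if h : target > 1 then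
    let ans1 := ans + PySem.Int.mod target 2
    let target1 := target - PySem.Int.mod target 2
    if maxDoubles > 0 then
      minMovesGo (PySem.Int.floordiv target1 2) (maxDoubles - 1) (ans1 + 1)
    else
      ans1 + (target1 - 1)
  else ans
termination_by target.toNat
decreasing_by
  have hm : PySem.Int.mod target 2 = target % 2 := PySem.Int.mod_eq_emod_of_pos (by omega)
  have hf : PySem.Int.floordiv (target - PySem.Int.mod target 2) 2
      = (target - PySem.Int.mod target 2) / 2 := PySem.Int.floordiv_eq_ediv_of_pos (by omega)
  rw [hf, hm]
  omega

def minMoves (target : Int) (maxDoubles : Int) : Int :=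
  minMovesGo target maxDoubles 0

-- ===== PORT B =====
def minMoves_alt (target : Int) (maxDoubles : Int) : Int :=
  if target ≤ 1 then 0
  else
    let m := max maxDoubles 0
    let bl : Int := (PySem.Int.bitLength target : Int) - 1
    if m ≥ bl then
      bl + (PySem.Int.bitCount target : Int) - 1
    else
      (PySem.Int.bitCount (PySem.Int.mod target (2 ^ m.toNat)) : Int) + m
        + PySem.Int.floordiv target (2 ^ m.toNat) - 1

-- ===== PRECONDITION & SPEC =====
def Spec_minMoves (target : Int) (maxDoubles : Int) (out : Int) : Prop := out = minMoves_alt target maxDoubles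
instance (target : Int) (maxDoubles : Int) (out : Int) : Decidable (Spec_minMoves target maxDoubles out) := by unfold Spec_minMoves; infer_instance

-- ===== CLAIM (what is proved, stated in full; the proofs are below) =====
def Claim_equal_minMoves : Prop := ∀ (target : Int) (maxDoubles : Int), Dom_minMoves target maxDoubles → Spec_minMoves target maxDoubles (minMoves target maxDoubles)

-- ===== LEMMAS AND PROOFS =====

lemma bitLength_pos (n : Int) (h : 0 < n) : 1 ≤ PySem.Int.bitLength n := by
  rw [PySem.Int.bitLength_of_pos h]; omega

lemma bitLength_ge_two (n : Int) (h : 1 < n) : 2 ≤ PySem.Int.bitLength n := by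
  rw [PySem.Int.bitLength_of_pos (show (0:Int) < n by omega)]
  have h2 : PySem.Int.floordiv n 2 = n / 2 := PySem.Int.floordiv_eq_ediv_of_pos (by omega)
  rw [h2]
  have := bitLength_pos (n / 2) (by omega)
  omega

-- alt is 0 at or below 1
lemma alt_base (t md : Int) (ht : t ≤ 1) : minMoves_alt t md = 0 := by
  simp [minMoves_alt, ht]

-- alt with no doubles left: t - 1
lemma alt_nodouble (t md : Int) (ht : 1 < t) (hmd : md ≤ 0) : minMoves_alt t md = t - 1 := by
  have hmax : max md 0 = 0 := by omega
  have hbl := bitLength_ge_two t ht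
  have hmod : PySem.Int.mod t 1 = t % 1 := PySem.Int.mod_eq_emod_of_pos (by omega)
  have hdiv : PySem.Int.floordiv t 1 = t / 1 := PySem.Int.floordiv_eq_ediv_of_pos (by omega)
  simp only [minMoves_alt, hmax]
  rw [if_neg (by omega)]
  rw [if_neg (by omega)]
  simp only [Int.toNat_zero, pow_zero, hmod, hdiv, Int.emod_one, Int.ediv_one,
    PySem.Int.bitCount_zero]
  omega

-- Nat-level halving facts
lemma nat_mod_pow_succ (n k : Nat) : n % 2 ^ (k + 1) = 2 * (n / 2 % 2 ^ k) + n % 2 := by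
  conv_lhs => rw [show n = 2 * (n / 2) + n % 2 by omega]
  rw [pow_succ, mul_comm (2 ^ k) 2, Nat.add_mod, Nat.mul_mod_mul_left]
  have h1 : n % 2 % (2 * 2 ^ k) = n % 2 := Nat.mod_eq_of_lt (by
    have : 1 ≤ 2 ^ k := Nat.one_le_two_pow
    omega)
  rw [h1]
  refine Nat.mod_eq_of_lt ?_
  have h2 : n / 2 % 2 ^ k < 2 ^ k := Nat.mod_lt _ (Nat.two_pow_pos k)
  omega

lemma nat_div_pow_succ (n k : Nat) : n / 2 ^ (k + 1) = n / 2 / 2 ^ k := by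
  rw [Nat.div_div_eq_div_mul, pow_succ, mul_comm]

lemma bitCount_two_mul_add (a b : Nat) (hb : b < 2) :
    PySem.Int.bitCount ((2 * a + b : Nat) : Int) = b + PySem.Int.bitCount ((a : Nat) : Int) := by
  rcases Nat.eq_zero_or_pos (2 * a + b) with h | h
  · have ha : a = 0 := by omega
    have hb0 : b = 0 := by omega
    simp [ha, hb0]
  · rw [PySem.Int.bitCount_natCast h]
    have h1 : (2 * a + b) % 2 = b := by omega
    have h2 : (2 * a + b) / 2 = a := by omega
    rw [h1, h2]

-- the recurrence satisfied by alt, stated over a Nat target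
lemma alt_rec (n : Nat) (md : Int) (hn : 2 ≤ n) (hmd : 1 ≤ md) :
    minMoves_alt (n : Int) md
      = ((n % 2 : Nat) : Int) + 1 + minMoves_alt ((n / 2 : Nat) : Int) (md - 1) := by
  have hmax : max md 0 = md := by omega
  have hmax' : max (md - 1) 0 = md - 1 := by omega
  have hBL : PySem.Int.bitLength (n : Int)
      = PySem.Int.bitLength ((n / 2 : Nat) : Int) + 1 := PySem.Int.bitLength_natCast (by omega)
  have hC : PySem.Int.bitCount (n : Int)
      = n % 2 + PySem.Int.bitCount ((n / 2 : Nat) : Int) := PySem.Int.bitCount_natCast (by omega)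
  rcases Nat.lt_or_ge n 4 with h4 | h4
  · -- n = 2 or n = 3 : the quotient is 1 and the full-doubling branch is taken
    have hrhs : minMoves_alt ((n / 2 : Nat) : Int) (md - 1) = 0 := by
      refine alt_base _ _ ?_
      have : n / 2 = 1 := by omega
      rw [this]; norm_num
    have hbl1 : PySem.Int.bitLength ((n / 2 : Nat) : Int) = 1 := by
      have : n / 2 = 1 := by omega
      rw [this]; decide
    have hc1 : PySem.Int.bitCount ((n / 2 : Nat) : Int) = 1 := by
      have : n / 2 = 1 := by omega
      rw [this]; decide
    rw [hrhs]
    simp only [minMoves_alt, hmax]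
    rw [if_neg (by exact_mod_cast (by omega : ¬ ((n:Int) ≤ 1))), if_pos (by rw [hBL, hbl1]; push_cast; omega)]
    rw [hBL, hbl1, hC, hc1]
    push_cast
    omega
  · -- n / 2 ≥ 2 : rewrite every primitive first, then split all branches at once
    have hq2 : 2 ≤ n / 2 := by omega
    simp only [minMoves_alt, hmax, hmax']
    set k : Nat := (md - 1).toNat with hk
    have hmdk : md.toNat = k + 1 := by omega
    have hpow : (2 : Int) ^ md.toNat = ((2 ^ (k + 1) : Nat) : Int) := by
      rw [hmdk]; push_cast; ring
    have hpow' : (2 : Int) ^ (md - 1).toNat = ((2 ^ k : Nat) : Int) := by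
      push_cast; ring
    rw [hpow, hpow', PySem.Int.mod_natCast, PySem.Int.mod_natCast,
      PySem.Int.floordiv_natCast, PySem.Int.floordiv_natCast,
      nat_mod_pow_succ n k, nat_div_pow_succ n k,
      bitCount_two_mul_add (n / 2 % 2 ^ k) (n % 2) (by omega), hBL, hC]
    push_cast
    split_ifs <;> omega

-- one unfolding of the loop body
lemma go_eq_aux : ∀ (N : Nat) (t md a : Int), t.toNat ≤ N →
    minMovesGo t md a = a + minMoves_alt t md := by
  intro N
  induction N with
  | zero =>
    intro t md a hN
    rw [minMovesGo, dif_neg (by omega : ¬ t > 1), alt_base t md (by omega)]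
    ring
  | succ N ih =>
    intro t md a hN
    by_cases ht : t ≤ 1
    · rw [minMovesGo, dif_neg (by omega : ¬ t > 1), alt_base t md ht]; ring
    · have hm : PySem.Int.mod t 2 = t % 2 := PySem.Int.mod_eq_emod_of_pos (by omega)
      rw [minMovesGo, dif_pos (by omega : t > 1)]
      by_cases hmd : md > 0
      · rw [if_pos hmd]
        have hf : PySem.Int.floordiv (t - PySem.Int.mod t 2) 2
            = (t - PySem.Int.mod t 2) / 2 := PySem.Int.floordiv_eq_ediv_of_pos (by omega)
        have htn : t = ((t.toNat : Nat) : Int) := by omega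
        have hhalf : (t - PySem.Int.mod t 2) / 2 = ((t.toNat / 2 : Nat) : Int) := by
          rw [hm]; omega
        rw [hf, hhalf, ih _ _ _ (by omega)]
        have hrec := alt_rec t.toNat md (by omega) (by omega)
        rw [← htn] at hrec
        rw [hrec]
        set X := minMoves_alt ((t.toNat / 2 : Nat) : Int) (md - 1)
        rw [hm]
        have : ((t.toNat % 2 : Nat) : Int) = t % 2 := by omega
        rw [this]
        ring
      · rw [if_neg hmd, alt_nodouble t md (by omega) (by omega), hm]
        ring

lemma go_eq (t md a : Int) : minMovesGo t md a = a + minMoves_alt t md :=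
  go_eq_aux t.toNat t md a le_rfl

-- ===== VERDICT (by name: the statement is the Claim_ definition above) =====
theorem minMoves_spec : Claim_equal_minMoves := by
  intro t md _
  unfold Spec_minMoves minMoves
  rw [go_eq]
  omega
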